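-- pv_equiv track=rewrite | github.com/simlirette/resilio-plus | core/constraint_matrix.py | _pick_non_consecutive
-- ===== SOURCE A (Python) =====
-- _DAY_ORDER = [
--     "monday", "tuesday", "wednesday", "thursday", "friday", "saturday", "sunday"
-- ]
--
-- def _pick_non_consecutive(days: list[str], count: int) -> list[str]:
--     """
--     Greedily pick `count` days, preferring non-consecutive spacing.
--     Falls back to consecutive days if not enough non-consecutive options exist.
--     """
--     if count <= 0 or not days:
--         return []
--
--     indices = [_DAY_ORDER.index(d) for d in days if d in _DAY_ORDER]
--     chosen: list[int] = []
--
--     for idx in indices: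
--         if len(chosen) >= count:
--             break
--         if not chosen or abs(idx - chosen[-1]) > 1:
--             chosen.append(idx)
--
--     # Fill remaining slots allowing consecutive days
--     for idx in indices:
--         if len(chosen) >= count:
--             break
--         if idx not in chosen:
--             chosen.append(idx)
--
--     return [_DAY_ORDER[i] for i in sorted(chosen[:count])]
-- ===== SOURCE B (Python) =====
-- _DAY_ORDER = [
--     "monday", "tuesday", "wednesday", "thursday", "friday", "saturday", "sunday"
-- ]
--
-- def _pick_non_consecutive(days: list[str], count: int) -> list[str]:
--     # Recursive, accumulator-free formulation: a budget-decrementing recursion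
--     # picks the non-consecutive prefix choices (tracking only the last pick),
--     # then a second recursion over the indices with a `seen` set fills the
--     # remaining budget; results are built by consing, not by appending to a
--     # mutated `chosen` list.
--     if count <= 0 or not days:
--         return []
--
--     indices = [_DAY_ORDER.index(d) for d in days if d in _DAY_ORDER]
--
--     def prefer(rest, last, k):
--         if not rest or k == 0:
--             return []
--         head = rest[0]
--         if last is None or abs(head - last) > 1:
--             return [head] + prefer(rest[1:], head, k - 1)
--         return prefer(rest[1:], last, k)
--
--     def fill(rest, seen, k):
--         if not rest or k == 0:
--             return []
--         head = rest[0]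
--         if head in seen:
--             return fill(rest[1:], seen, k)
--         return [head] + fill(rest[1:], seen | {head}, k - 1)
--
--     first = prefer(indices, None, count)
--     chosen = first + fill(indices, set(first), count - len(first))
--     return [_DAY_ORDER[i] for i in sorted(chosen)]
-- ===== Notes on version B (the rewrite author's own statement) =====
-- stated objective: alternative
-- what changed: A's imperative two-pass loop mutating a shared `chosen` list (break on len>=count, chosen[-1], `idx not in chosen` rescans) is replaced by two accumulator-free recursions that build their result by consing: a budget-decrementing recursion tracking only the last pick, then a fill recursion carrying a `seen` set, concatenated and sorted.
import Mathlib
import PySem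

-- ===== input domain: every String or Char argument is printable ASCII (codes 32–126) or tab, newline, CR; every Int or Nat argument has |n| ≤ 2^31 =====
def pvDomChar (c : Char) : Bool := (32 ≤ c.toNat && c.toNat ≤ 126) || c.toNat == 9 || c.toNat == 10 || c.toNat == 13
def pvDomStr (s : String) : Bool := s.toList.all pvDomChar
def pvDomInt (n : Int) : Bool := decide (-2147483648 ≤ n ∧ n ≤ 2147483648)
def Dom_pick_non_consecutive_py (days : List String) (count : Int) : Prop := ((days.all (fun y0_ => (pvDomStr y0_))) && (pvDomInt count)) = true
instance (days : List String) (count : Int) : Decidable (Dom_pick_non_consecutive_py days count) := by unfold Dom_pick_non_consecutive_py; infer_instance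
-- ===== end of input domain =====

-- B replaces A's imperative two-pass loop over a shared mutable `chosen` list
-- by two accumulator-free, budget-decrementing recursions built by consing
-- (objective: alternative decomposition, same cost).

-- shared helper: the module constant _DAY_ORDER and the index comprehension
-- both Source A and Source B share verbatim
def pvDAY : List String :=
  ["monday", "tuesday", "wednesday", "thursday", "friday", "saturday", "sunday"]

-- _DAY_ORDER[i]; every i fed to it comes from _DAY_ORDER.index, so it is in range
def pvDayAt (i : Int) : String := (PySem.List.pyGet? pvDAY i).getD ""

-- [_DAY_ORDER.index(d) for d in days if d in _DAY_ORDER]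
def pncIndices (days : List String) : List Int :=
  days.filterMap (fun d =>
    if d ∈ pvDAY then (PySem.List.index? pvDAY d).map (fun n => (n : Int)) else none)

-- ===== PORT A =====
-- first loop: greedy non-consecutive picks appending to chosen, break at count
def pncLoop1 (count : Int) : List Int → List Int → List Int
  | [], chosen => chosen
  | idx :: rest, chosen =>
    if count ≤ (chosen.length : Int) then chosen
    else if chosen = [] ∨ 1 < (idx - PySem.List.pyGetD chosen (-1) 0).natAbs then
      pncLoop1 count rest (chosen ++ [idx])
    else pncLoop1 count rest chosen

-- second loop: rescan all indices, fill remaining slots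
def pncLoop2 (count : Int) : List Int → List Int → List Int
  | [], chosen => chosen
  | idx :: rest, chosen =>
    if count ≤ (chosen.length : Int) then chosen
    else if idx ∈ chosen then pncLoop2 count rest chosen
    else pncLoop2 count rest (chosen ++ [idx])

def pick_non_consecutive_py (days : List String) (count : Int) : List String :=
  if count ≤ 0 ∨ days = [] then []
  else
    (PySem.List.sorted (PySem.List.slice
      (pncLoop2 count (pncIndices days) (pncLoop1 count (pncIndices days) []))
      none (some count)) id false).map pvDayAt

-- ===== PORT B =====
-- prefer(rest, last, k): cons-built recursion, tracks only the last pick and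
-- the remaining budget k
def pncPrefer : List Int → Option Int → Int → List Int
  | [], _, _ => []
  | head :: rest, last, k =>
    if k = 0 then []
    else if last = none ∨ 1 < (head - last.getD 0).natAbs then
      head :: pncPrefer rest (some head) (k - 1)
    else pncPrefer rest last k

-- fill(rest, seen, k): cons-built recursion carrying a `seen` set
def pncFillB : List Int → PySem.Set Int → Int → List Int
  | [], _, _ => []
  | head :: rest, seen, k =>
    if k = 0 then []
    else if head ∈ seen then pncFillB rest seen k
    else head :: pncFillB rest (PySem.Set.add seen head) (k - 1)

def pick_non_consecutive_py_alt (days : List String) (count : Int) : List String :=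
  if count ≤ 0 ∨ days = [] then []
  else
    (PySem.List.sorted
      (pncPrefer (pncIndices days) none count ++
        pncFillB (pncIndices days)
          (PySem.Set.ofList (pncPrefer (pncIndices days) none count))
          (count - ((pncPrefer (pncIndices days) none count).length : Int)))
      id false).map pvDayAt

-- ===== PRECONDITION & SPEC =====
def Spec_pick_non_consecutive_py (days : List String) (count : Int) (out : List String) : Prop := out = pick_non_consecutive_py_alt days count
instance (days : List String) (count : Int) (out : List String) : Decidable (Spec_pick_non_consecutive_py days count out) := by unfold Spec_pick_non_consecutive_py; infer_instance

-- ===== CLAIM =====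
def Claim_equal_pick_non_consecutive_py : Prop := ∀ (days : List String) (count : Int), Dom_pick_non_consecutive_py days count → Spec_pick_non_consecutive_py days count (pick_non_consecutive_py days count)

-- ===== LEMMAS AND PROOFS =====

-- A's first loop from accumulator ch is ch ++ the prefer recursion seeded with
-- ch's last element and the remaining budget
theorem pncLoop1_eq_prefer (count : Int) (l : List Int) : ∀ (ch : List Int),
    (ch.length : Int) ≤ count →
    pncLoop1 count l ch = ch ++ pncPrefer l ch.getLast? (count - (ch.length : Int)) := by
  induction l with
  | nil => intro ch _; simp [pncLoop1, pncPrefer]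
  | cons idx rest ih =>
    intro ch hlen
    simp only [pncLoop1, pncPrefer]
    by_cases hfull : count ≤ (ch.length : Int)
    · rw [if_pos hfull, if_pos (by omega : count - (ch.length : Int) = 0)]
      simp
    · rw [if_neg hfull, if_neg (by omega : ¬ count - (ch.length : Int) = 0)]
      have hcond : (ch = [] ∨ 1 < (idx - PySem.List.pyGetD ch (-1) 0).natAbs) ↔
          (ch.getLast? = none ∨ 1 < (idx - ch.getLast?.getD 0).natAbs) := by
        rcases eq_or_ne ch [] with h | h
        · subst h; simp
        · rw [PySem.List.pyGetD_neg_one ch 0 h]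
          simp [List.getLast?_eq_some_getLast h, h]
      by_cases hc : ch = [] ∨ 1 < (idx - PySem.List.pyGetD ch (-1) 0).natAbs
      · rw [if_pos hc, if_pos (hcond.mp hc)]
        have hlen' : (((ch ++ [idx]).length : Nat) : Int) = (ch.length : Int) + 1 := by
          simp
        rw [ih (ch ++ [idx]) (by omega)]
        rw [List.getLast?_concat, hlen']
        have hb : count - ((ch.length : Int) + 1) = count - (ch.length : Int) - 1 := by
          ring
        rw [hb, List.append_assoc, List.singleton_append]
      · rw [if_neg hc, if_neg (fun h => hc (hcond.mpr h))]
        exact ih ch hlen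

-- the prefer recursion never exceeds its budget
theorem pncPrefer_len (l : List Int) : ∀ (last : Option Int) (k : Int), 0 ≤ k →
    ((pncPrefer l last k).length : Int) ≤ k := by
  induction l with
  | nil => intro last k hk; simp [pncPrefer]; omega
  | cons head rest ih =>
    intro last k hk
    simp only [pncPrefer]
    split_ifs with h0 hc
    · simpa using hk
    · have := ih (some head) (k - 1) (by omega)
      simp only [List.length_cons]
      push_cast
      omega
    · exact ih last k hk

-- the fill recursion never exceeds its budget
theorem pncFillB_len (l : List Int) : ∀ (seen : PySem.Set Int) (k : Int), 0 ≤ k →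
    ((pncFillB l seen k).length : Int) ≤ k := by
  induction l with
  | nil => intro seen k hk; simp [pncFillB]; omega
  | cons head rest ih =>
    intro seen k hk
    simp only [pncFillB]
    split_ifs with h0 hc
    · simpa using hk
    · exact ih seen k hk
    · have := ih (PySem.Set.add seen head) (k - 1) (by omega)
      simp only [List.length_cons]
      push_cast
      omega

-- A's rescan loop from chosen X equals X ++ the fill recursion over a seen set
-- with X's membership
theorem pncLoop2_eq_fill (count : Int) (l : List Int) : ∀ (X : List Int) (S : PySem.Set Int),
    (X.length : Int) ≤ count → (∀ x, x ∈ S ↔ x ∈ X) →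
    pncLoop2 count l X = X ++ pncFillB l S (count - (X.length : Int)) := by
  induction l with
  | nil => intro X S _ _; simp [pncLoop2, pncFillB]
  | cons idx rest ih =>
    intro X S hlen hS
    simp only [pncLoop2, pncFillB]
    by_cases hfull : count ≤ (X.length : Int)
    · rw [if_pos hfull, if_pos (by omega : count - (X.length : Int) = 0)]
      simp
    · rw [if_neg hfull, if_neg (by omega : ¬ count - (X.length : Int) = 0)]
      by_cases hmem : idx ∈ X
      · rw [if_pos hmem, if_pos ((hS idx).mpr hmem)]
        exact ih X S hlen hS
      · rw [if_neg hmem, if_neg (fun h => hmem ((hS idx).mp h))]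
        have hlen' : (((X ++ [idx]).length : Nat) : Int) = (X.length : Int) + 1 := by
          simp
        rw [ih (X ++ [idx]) (PySem.Set.add S idx) (by omega)
          (by intro x; rw [PySem.Set.mem_add, hS x]; simp)]
        rw [hlen']
        have hb : count - ((X.length : Int) + 1) = count - (X.length : Int) - 1 := by
          ring
        rw [hb, List.append_assoc, List.singleton_append]

-- ===== VERDICT =====
theorem pick_non_consecutive_py_spec : Claim_equal_pick_non_consecutive_py := by
  intro days count _
  unfold Spec_pick_non_consecutive_py pick_non_consecutive_py pick_non_consecutive_py_alt
  split_ifs with h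
  · rfl
  · have hpos : 0 < count := by push Not at h; omega
    have h1 := pncLoop1_eq_prefer count (pncIndices days) [] (by simp; omega)
    simp only [List.length_nil, Nat.cast_zero, sub_zero, List.getLast?_nil,
      List.nil_append] at h1
    set first := pncPrefer (pncIndices days) none count with hfirst
    have hflen : ((first).length : Int) ≤ count := pncPrefer_len _ _ _ (by omega)
    have h2 := pncLoop2_eq_fill count (pncIndices days) first
      (PySem.Set.ofList first) hflen
      (fun x => PySem.Set.mem_ofList first x)
    rw [h1, h2]
    -- the slice [:count] is the identity: the list is no longer than count
    have hfill := pncFillB_len (pncIndices days) (PySem.Set.ofList first)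
      (count - (first.length : Int)) (by omega)
    rw [PySem.List.slice_to _ (by omega : (0:Int) ≤ count)]
    rw [List.take_of_length_le (by simp; omega)]
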